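-- pv_equiv track=rewrite | github.com/flosx-talca/SGT2.0 | app/services/rule_engine.py | eval_sequence
-- ===== SOURCE A (Python) =====
-- def eval_sequence(rule, ctx):
--     """
--     ctx['sequence']: lista de booleans (True=trabaja) para el período.
--     params: max_days (hard) o preferred_min_days/preferred_max_days (soft)
--     """
--     sequence = ctx.get('sequence', [])
--     if not sequence:
--         return True, 'Sin secuencia para evaluar.'
--     params = rule.get('params', {})
--     max_days = params.get('max_days') or params.get('value')
--     max_consecutive = 0
--     current = 0
--     for day in sequence:
--         if day:
--             current += 1
--             max_consecutive = max(max_consecutive, current)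
--         else:
--             current = 0
--     if max_days is not None:
--         passed = max_consecutive <= max_days
--         return passed, f'Máx consecutivos={max_consecutive}, límite={max_days} → {"OK" if passed else "FALLA"}'
--     return True, f'Máx consecutivos={max_consecutive}'
-- ===== SOURCE B (Python) =====
-- from itertools import groupby
--
-- def eval_sequence(rule, ctx):
--     """Group-by re-implementation: the sequence is split into maximal runs of
--     equal truthiness with itertools.groupby; the longest True-run length is the
--     max over those run lengths.  Verdict/message building is factored out."""
--     sequence = ctx.get('sequence', [])
--     if not sequence:
--         return True, 'Sin secuencia para evaluar.'
--     params = rule.get('params', {})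
--     max_days = params.get('max_days') or params.get('value')
--     mc = max((sum(1 for _ in g) for k, g in groupby(map(bool, sequence)) if k),
--              default=0)
--     if max_days is None:
--         return True, f'Máx consecutivos={mc}'
--     return _verdict(mc, max_days)
--
-- def _verdict(mc, limit):
--     ok = mc <= limit
--     return ok, f'Máx consecutivos={mc}, límite={limit} → ' + ('OK' if ok else 'FALLA')
-- ===== Notes on version B (the rewrite author's own statement) =====
-- stated objective: alternative
-- what changed: The running current/max counter loop is replaced by run segmentation with itertools.groupby: the sequence is cut into maximal runs of equal truthiness and the answer is the max over the True-run lengths (default 0); verdict/message building is factored into a helper and the limit-absent branch returns first.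
import Mathlib
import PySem

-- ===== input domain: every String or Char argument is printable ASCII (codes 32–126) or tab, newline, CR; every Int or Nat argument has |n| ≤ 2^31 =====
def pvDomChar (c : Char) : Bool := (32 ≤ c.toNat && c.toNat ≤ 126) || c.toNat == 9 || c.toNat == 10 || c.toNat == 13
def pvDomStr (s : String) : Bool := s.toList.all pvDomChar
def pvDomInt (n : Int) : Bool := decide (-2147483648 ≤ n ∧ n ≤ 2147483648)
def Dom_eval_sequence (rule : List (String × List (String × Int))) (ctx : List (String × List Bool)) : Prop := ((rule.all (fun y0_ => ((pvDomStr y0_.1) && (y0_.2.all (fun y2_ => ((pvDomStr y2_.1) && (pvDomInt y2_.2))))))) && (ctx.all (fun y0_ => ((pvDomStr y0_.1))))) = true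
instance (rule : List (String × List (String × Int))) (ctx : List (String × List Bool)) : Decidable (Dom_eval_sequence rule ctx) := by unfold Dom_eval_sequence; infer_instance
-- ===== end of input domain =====

-- B replaces A's running current/max counters with groupby-style run segmentation:
-- build the list of maximal equal-truthiness runs, keep the True-run lengths, take
-- their max (default 0); verdict/message building is a helper. Objective: alternative.

-- ===== PORT A =====
-- the loop body of A's for-loop: state (max_consecutive, current)
def pvStepA (s : Int × Int) (day : Bool) : Int × Int :=
  if day then (max s.1 (s.2 + 1), s.2 + 1) else (s.1, 0)

def eval_sequence (rule : List (String × List (String × Int))) (ctx : List (String × List Bool)) : Bool × String :=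
  let sequence := (PySem.Dict.mk ctx).getD "sequence" []
  if sequence.isEmpty then (true, "Sin secuencia para evaluar.")
  else
    let params := (PySem.Dict.mk rule).getD "params" []
    -- max_days = params.get('max_days') or params.get('value')  (Python `or`: 0 is falsy)
    let max_days : Option Int :=
      match (PySem.Dict.mk params).get? "max_days" with
      | some v => if v ≠ 0 then some v else (PySem.Dict.mk params).get? "value"
      | none => (PySem.Dict.mk params).get? "value"
    let st := sequence.foldl pvStepA (0, 0)
    match max_days with
    | some md =>
        let passed := decide (st.1 ≤ md)
        (passed, "Máx consecutivos=" ++ PySem.Int.toStr st.1 ++ ", límite=" ++ PySem.Int.toStr md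
                   ++ " → " ++ (if passed then "OK" else "FALLA"))
    | none => (true, "Máx consecutivos=" ++ PySem.Int.toStr st.1)

-- ===== PORT B =====
-- itertools.groupby over the sequence: the list of (key, run length) for maximal runs
def pvRuns : List Bool → List (Bool × Int)
  | [] => []
  | b :: t =>
      (b, 1 + ((t.takeWhile (· == b)).length : Int)) :: pvRuns (t.dropWhile (· == b))
termination_by l => l.length
decreasing_by
  have := List.length_dropWhile_le (p := (· == b)) (l := t); simp; omega

-- 'sum(1 for _ in g) for k, g in … if k': lengths of the True-keyed runs
def pvTrueLens (rs : List (Bool × Int)) : List Int :=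
  rs.filterMap (fun p => if p.1 then some p.2 else none)

-- Python max(iterable, default=0)
def pvMaxDefault0 : List Int → Int
  | [] => 0
  | x :: xs => xs.foldl max x

-- Source B's _verdict helper
def pvVerdict (mc limit : Int) : Bool × String :=
  let ok := decide (mc ≤ limit)
  (ok, "Máx consecutivos=" ++ PySem.Int.toStr mc ++ ", límite=" ++ PySem.Int.toStr limit
         ++ " → " ++ (if ok then "OK" else "FALLA"))

def eval_sequence_alt (rule : List (String × List (String × Int))) (ctx : List (String × List Bool)) : Bool × String :=
  let sequence := (PySem.Dict.mk ctx).getD "sequence" []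
  if sequence.isEmpty then (true, "Sin secuencia para evaluar.")
  else
    let params := (PySem.Dict.mk rule).getD "params" []
    let max_days : Option Int :=
      match (PySem.Dict.mk params).get? "max_days" with
      | some v => if v ≠ 0 then some v else (PySem.Dict.mk params).get? "value"
      | none => (PySem.Dict.mk params).get? "value"
    let mc := pvMaxDefault0 (pvTrueLens (pvRuns sequence))
    match max_days with
    | none => (true, "Máx consecutivos=" ++ PySem.Int.toStr mc)
    | some md => pvVerdict mc md

-- ===== PRECONDITION & SPEC =====
def Spec_eval_sequence (rule : List (String × List (String × Int))) (ctx : List (String × List Bool)) (out : Bool × String) : Prop := out = eval_sequence_alt rule ctx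
instance (rule : List (String × List (String × Int))) (ctx : List (String × List Bool)) (out : Bool × String) : Decidable (Spec_eval_sequence rule ctx out) := by unfold Spec_eval_sequence; infer_instance

-- ===== CLAIM (what is proved, stated in full; the proofs are below) =====
def Claim_equal_eval_sequence : Prop := ∀ (rule : List (String × List (String × Int))) (ctx : List (String × List Bool)), Dom_eval_sequence rule ctx → Spec_eval_sequence rule ctx (eval_sequence rule ctx)

-- ===== LEMMAS AND PROOFS =====

-- proof-only reference function: longest run of True, by direct recursion
def pvMaxRun : List Bool → Int
  | [] => 0
  | false :: t => pvMaxRun t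
  | true :: t => max (1 + ((t.takeWhile id).length : Int)) (pvMaxRun (t.dropWhile id))
termination_by seq => seq.length
decreasing_by
  · simp
  · have := List.length_dropWhile_le (p := id) (l := t); simp; omega

theorem pvMaxRun_nonneg : ∀ seq, 0 ≤ pvMaxRun seq
  | [] => by simp [pvMaxRun]
  | false :: t => by simpa [pvMaxRun] using pvMaxRun_nonneg t
  | true :: t => by
      have h := pvMaxRun_nonneg (t.dropWhile id)
      simp [pvMaxRun]
      omega
termination_by seq => seq.length
decreasing_by
  · simp
  · have := List.length_dropWhile_le (p := id) (l := t); simp; omega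

theorem pvMaxRun_split (seq : List Bool) :
    pvMaxRun seq = max ((seq.takeWhile id).length : Int) (pvMaxRun (seq.dropWhile id)) := by
  match seq with
  | [] => simp [pvMaxRun]
  | false :: t =>
    have h := pvMaxRun_nonneg t
    simp [pvMaxRun, List.takeWhile, List.dropWhile]
    omega
  | true :: t =>
    simp [pvMaxRun, List.takeWhile, List.dropWhile]
    omega

theorem pvLoop_eq (seq : List Bool) (m c : Int) (hc : 0 ≤ c) (hm : c ≤ m) :
    (seq.foldl pvStepA (m, c)).1
      = max m (max (c + ((seq.takeWhile id).length : Int)) (pvMaxRun (seq.dropWhile id))) := by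
  induction seq generalizing m c with
  | nil =>
    simp [pvMaxRun]
    omega
  | cons d t ih =>
    cases d with
    | true =>
      have h := ih (max m (c + 1)) (c + 1) (by omega) (le_max_right _ _)
      simp only [List.foldl, pvStepA, if_true]
      rw [h]
      simp [List.takeWhile, List.dropWhile]
      omega
    | false =>
      have h := ih m 0 le_rfl (le_trans hc hm)
      simp only [List.foldl, pvStepA, if_false, Bool.false_eq_true]
      rw [h]
      have hs := pvMaxRun_split t
      simp only [List.takeWhile, List.dropWhile, id] at *
      simp [pvMaxRun]
      omega

theorem pvLoop_eq_maxRun (seq : List Bool) :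
    (seq.foldl pvStepA ((0 : Int), (0 : Int))).1 = pvMaxRun seq := by
  rw [pvLoop_eq seq 0 0 le_rfl le_rfl, pvMaxRun_split seq]
  have h1 := pvMaxRun_nonneg (seq.dropWhile id)
  omega

theorem pv_beq_true : (fun b : Bool => b == true) = id := by
  funext b; cases b <;> rfl

theorem pv_foldl_max_init (xs : List Int) : ∀ a b, xs.foldl max (max a b) = max a (xs.foldl max b) := by
  induction xs with
  | nil => intro a b; rfl
  | cons x t ih =>
    intro a b
    simp only [List.foldl, max_assoc]
    exact ih a (max b x)

theorem pvMaxDefault0_cons (x : Int) (xs : List Int) (hx : 0 ≤ x) :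
    pvMaxDefault0 (x :: xs) = max x (pvMaxDefault0 xs) := by
  cases xs with
  | nil => simp [pvMaxDefault0]; omega
  | cons y t =>
    show (y :: t).foldl max x = max x (t.foldl max y)
    have := pv_foldl_max_init t x y
    simpa [List.foldl] using this

theorem pv_beq_false : (fun b : Bool => b == false) = (fun b => !b) := by
  funext b; cases b <;> rfl

theorem pvLensTrue (t : List Bool) :
    pvTrueLens (pvRuns (true :: t))
      = (1 + ((t.takeWhile id).length : Int)) :: pvTrueLens (pvRuns (t.dropWhile id)) := by
  rw [pvRuns, pv_beq_true]
  simp [pvTrueLens]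

theorem pvLensFalse (t : List Bool) :
    pvTrueLens (pvRuns (false :: t)) = pvTrueLens (pvRuns (t.dropWhile (fun b => !b))) := by
  rw [pvRuns, pv_beq_false]
  simp [pvTrueLens]

theorem pvMaxRun_dropNot : ∀ t : List Bool, pvMaxRun (t.dropWhile (fun b => !b)) = pvMaxRun t := by
  intro t
  induction t with
  | nil => rfl
  | cons b t ih =>
    cases b with
    | false => simpa [List.dropWhile, pvMaxRun] using ih
    | true => simp [List.dropWhile, pvMaxRun]

theorem pvMcB_eq_maxRun : ∀ seq : List Bool, pvMaxDefault0 (pvTrueLens (pvRuns seq)) = pvMaxRun seq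
  | [] => by simp [pvRuns, pvTrueLens, pvMaxDefault0, pvMaxRun]
  | false :: t => by
    have ih := pvMcB_eq_maxRun (t.dropWhile (fun b => !b))
    rw [pvLensFalse, ih, pvMaxRun_dropNot]
    simp [pvMaxRun]
  | true :: t => by
    have ih := pvMcB_eq_maxRun (t.dropWhile id)
    rw [pvLensTrue,
        pvMaxDefault0_cons _ _ (by positivity), ih]
    simp [pvMaxRun]
termination_by seq => seq.length
decreasing_by
  · have := List.length_dropWhile_le (p := (fun b : Bool => !b)) (l := t); simp at this ⊢; omega
  · have := List.length_dropWhile_le (p := (id : Bool → Bool)) (l := t); simp at this ⊢; omega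

-- ===== VERDICT (by name: the statement is the Claim_ definition above) =====
theorem eval_sequence_spec : Claim_equal_eval_sequence := by
  intro rule ctx _
  unfold Spec_eval_sequence eval_sequence eval_sequence_alt pvVerdict
  simp only [pvLoop_eq_maxRun, pvMcB_eq_maxRun]
  split
  · rfl
  · split
    next md heq => rw [heq]
    next heq => rw [heq]
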